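-- pv_equiv track=rewrite | github.com/woshiliyuan/learnPython | leetCode/topic/04dynamic/_8_600_findIntegers.py | findIntegers1
-- ===== SOURCE A (Python) =====
-- def findIntegers1(n: int) -> int:
--     def serial_one(num):
--         last = 0
--         while num != 0:
--             num,temp = num // 2,num % 2
--             if temp == 1 and last == 1:
--                 return True
--             last = temp
--         return False
--
--     count = 0
--     for i in range(n + 1):
--         if not serial_one(i): count += 1
--     return count
-- ===== SOURCE B (Python) =====
-- def findIntegers1(n: int) -> int:
--     # Digit DP over the bits of n (Fibonacci counting), O(log n) instead of scanning 0..n.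
--     if n < 0:
--         return 0
--     fib = [1, 2]
--     for _ in range(33):
--         fib.append(fib[-1] + fib[-2])
--     ans = 0
--     prev = 0
--     for i in range(n.bit_length() - 1, -1, -1):
--         if (n >> i) & 1:
--             ans += fib[i]
--             if prev:
--                 return ans
--             prev = 1
--         else:
--             prev = 0
--     return ans + 1
-- ===== Notes on version B (the rewrite author's own statement) =====
-- stated objective: faster
-- what changed: Replaced the scan of every integer 0..n (testing each for consecutive binary ones) by a Fibonacci digit DP over the bits of n.
import Mathlib
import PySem

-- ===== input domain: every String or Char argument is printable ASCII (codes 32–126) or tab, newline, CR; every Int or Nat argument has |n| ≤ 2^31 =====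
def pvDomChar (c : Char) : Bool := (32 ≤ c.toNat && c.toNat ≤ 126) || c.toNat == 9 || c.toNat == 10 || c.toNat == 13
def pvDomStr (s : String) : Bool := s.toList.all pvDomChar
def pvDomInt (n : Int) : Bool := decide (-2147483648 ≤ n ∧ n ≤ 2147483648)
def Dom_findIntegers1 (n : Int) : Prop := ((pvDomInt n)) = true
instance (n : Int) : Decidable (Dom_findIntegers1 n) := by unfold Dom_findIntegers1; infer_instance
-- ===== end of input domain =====

-- B replaces A's scan of all integers 0..n by a Fibonacci digit DP over the bits of n (O(log n)).

-- ===== PORT A =====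
-- serial_one: exact for num ≥ 0 (the only values A calls it on, i ∈ range(n+1));
-- on nonnegative ints Python's //2 and %2 coincide with Nat division/mod.
def serialOne (num last : Nat) : Bool :=
  if h : num = 0 then false
  else if num % 2 = 1 ∧ last = 1 then true
  else serialOne (num / 2) (num % 2)
decreasing_by exact Nat.div_lt_self (Nat.pos_of_ne_zero h) one_lt_two

def findIntegers1 (n : Int) : Int :=
  (PySem.List.pyRange 0 (n + 1) 1).foldl
    (fun count i => if !(serialOne i.toNat 0) then count + 1 else count) 0

-- ===== PORT B =====
-- fib = [1, 2]; for _ in range(33): fib.append(fib[-1] + fib[-2])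
def fibList : List Int :=
  (List.range 33).foldl
    (fun acc _ => acc ++ [acc.getD (acc.length - 1) 0 + acc.getD (acc.length - 2) 0])
    [1, 2]

-- n.bit_length() for n ≥ 0
def bitLen (m : Nat) : Nat := if m = 0 then 0 else Nat.log2 m + 1

-- the for-loop over i = bl-1, …, 0 with early return; fib[i] is in range on every
-- reachable call (i < bitLen m ≤ 35), getD's default is never used there
def altLoop (m : Nat) (fib : List Int) : Nat → Int → Int → Int
  | 0, _, ans => ans + 1
  | c+1, prev, ans =>
      if (m >>> c) &&& 1 = 1 then
        let ans' := ans + fib.getD c 0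
        if prev ≠ 0 then ans'
        else altLoop m fib c 1 ans'
      else altLoop m fib c 0 ans

def findIntegers1_alt (n : Int) : Int :=
  if n < 0 then 0
  else altLoop n.toNat fibList (bitLen n.toNat) 0 0

-- ===== PRECONDITION & SPEC =====
def Spec_findIntegers1 (n : Int) (out : Int) : Prop := out = findIntegers1_alt n
instance (n : Int) (out : Int) : Decidable (Spec_findIntegers1 n out) := by unfold Spec_findIntegers1; infer_instance

-- ===== CLAIM (what is proved, stated in full; the proofs are below) =====
def Claim_equal_findIntegers1 : Prop := ∀ (n : Int), Dom_findIntegers1 n → Spec_findIntegers1 n (findIntegers1 n)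

-- ===== LEMMAS AND PROOFS =====

-- number of integers in [0, m) with no two consecutive binary ones
def goodCnt (m : Nat) : Nat := (List.range m).countP (fun y => !serialOne y 0)

def fibN : Nat → Nat
  | 0 => 1
  | 1 => 2
  | k+2 => fibN (k+1) + fibN k

lemma serialOne_zero (last : Nat) : serialOne 0 last = false := by
  rw [serialOne]; simp

lemma serialOne_step (num last : Nat) (h : num ≠ 0) :
    serialOne num last = if num % 2 = 1 ∧ last = 1 then true else serialOne (num / 2) (num % 2) := by
  rw [serialOne]; simp [h]

lemma serialOne_even (a last : Nat) (ha : a % 2 = 0) : serialOne a last = serialOne a 0 := by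
  by_cases h : a = 0
  · simp [h, serialOne_zero]
  · rw [serialOne_step a last h, serialOne_step a 0 h]
    simp [ha]

lemma serialOne_double (p : Nat) : serialOne (2 * p) 0 = serialOne p 0 := by
  rcases Nat.eq_zero_or_pos p with h | h
  · simp [h]
  · rw [serialOne_step _ _ (by omega)]
    have h1 : 2 * p % 2 = 0 := by omega
    have h2 : 2 * p / 2 = p := by omega
    simp [h1, h2]

lemma serialOne_odd (p : Nat) (hp : p % 2 = 0) (hg : serialOne p 0 = false) :
    serialOne (2 * p + 1) 0 = false := by
  rw [serialOne_step _ _ (by omega)]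
  have h1 : (2 * p + 1) % 2 = 1 := by omega
  have h2 : (2 * p + 1) / 2 = p := by omega
  simp only [h1, h2, and_true, one_ne_zero, and_false, if_false]
  rcases Nat.eq_zero_or_pos p with h | h
  · simp [h, serialOne_zero]
  · rw [serialOne_step _ _ (by omega)] at hg ⊢
    simp only [hp] at hg ⊢
    simpa using hg

lemma goodCnt_succ (m : Nat) :
    goodCnt (m + 1) = goodCnt m + (if serialOne m 0 then 0 else 1) := by
  unfold goodCnt
  rw [List.range_succ, List.countP_append]
  cases h : serialOne m 0 <;> simp [h]

lemma goodCnt_split (s t : Nat) :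
    goodCnt (s + t) = goodCnt s + (List.range t).countP (fun y => !serialOne (s + y) 0) := by
  unfold goodCnt
  rw [List.range_add, List.countP_append, List.countP_map]
  rfl

-- prefix decomposition: an even good prefix a above c free bits
lemma serialOne_prefix (c : Nat) :
    ∀ y last a, y < 2 ^ c → a % 2 = 0 →
      serialOne (a * 2 ^ c + y) last = (serialOne y last || serialOne a 0) := by
  induction c with
  | zero =>
      intro y last a hy ha
      interval_cases y
      simp only [pow_zero, mul_one, Nat.add_zero, serialOne_zero, Bool.false_or]
      exact serialOne_even a last ha
  | succ c ih =>
      intro y last a hy ha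
      by_cases hz : a * 2 ^ (c + 1) + y = 0
      · have ha0 : a = 0 := by
          rcases Nat.eq_zero_or_pos a with h | h
          · exact h
          · exfalso; have : 0 < a * 2 ^ (c+1) := by positivity
            omega
        have hy0 : y = 0 := by omega
        simp [ha0, hy0, serialOne]
      · have hmod : (a * 2 ^ (c + 1) + y) % 2 = y % 2 := by
          have : a * 2 ^ (c + 1) = (a * 2 ^ c) * 2 := by ring
          omega
        have hdiv : (a * 2 ^ (c + 1) + y) / 2 = a * 2 ^ c + y / 2 := by
          have h1 : a * 2 ^ (c + 1) = (a * 2 ^ c) * 2 := by ring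
          omega
        rw [serialOne_step _ _ hz]
        simp only [hmod, hdiv]
        have hy2 : y / 2 < 2 ^ c := by
          have h2 : (2:ℕ) ^ (c + 1) = 2 * 2 ^ c := by ring
          omega
        by_cases hc1 : y % 2 = 1 ∧ last = 1
        · -- condition fires on both sides
          have hyne : y ≠ 0 := by omega
          rw [serialOne_step y last hyne]
          simp [hc1]
        · rw [if_neg hc1, ih (y / 2) (y % 2) a hy2 ha]
          by_cases hyz : y = 0
          · subst hyz
            simp [serialOne_zero]
          · rw [serialOne_step y last hyz, if_neg hc1]

-- a prefix a ≡ 3 (mod 4) makes every extension bad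
lemma serialOne_bad (c : Nat) :
    ∀ y last a, y < 2 ^ c → a % 4 = 3 → serialOne (a * 2 ^ c + y) last = true := by
  induction c with
  | zero =>
      intro y last a hy ha
      interval_cases y
      simp only [pow_zero, mul_one, Nat.add_zero]
      rw [serialOne_step _ _ (by omega)]
      have h1 : a % 2 = 1 := by omega
      simp only [h1]
      by_cases hl : last = 1
      · simp [hl]
      · have hd1 : a / 2 % 2 = 1 := by omega
        rw [serialOne_step _ _ (by omega : a / 2 ≠ 0)]
        simp [hl, hd1]
  | succ c ih =>
      intro y last a hy ha
      have hne : a * 2 ^ (c + 1) + y ≠ 0 := by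
        have : 0 < a * 2 ^ (c + 1) := Nat.mul_pos (by omega) (Nat.two_pow_pos _)
        omega
      have hmod : (a * 2 ^ (c + 1) + y) % 2 = y % 2 := by
        have : a * 2 ^ (c + 1) = (a * 2 ^ c) * 2 := by ring
        omega
      have hdiv : (a * 2 ^ (c + 1) + y) / 2 = a * 2 ^ c + y / 2 := by
        have h1 : a * 2 ^ (c + 1) = (a * 2 ^ c) * 2 := by ring
        omega
      rw [serialOne_step _ _ hne]
      simp only [hmod, hdiv]
      by_cases hc1 : y % 2 = 1 ∧ last = 1
      · simp [hc1]
      · rw [if_neg hc1, ih (y / 2) (y % 2) a (by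
          have : (2:ℕ) ^ (c + 1) = 2 * 2 ^ c := by ring
          omega) ha]

lemma goodCnt_pow (k : Nat) : goodCnt (2 ^ k) = fibN k := by
  induction k using Nat.strong_induction_on with
  | _ k ih =>
    match k with
    | 0 => simp [goodCnt, serialOne_zero, fibN]
    | 1 =>
      have h1 : serialOne 1 0 = false := by rw [serialOne_step _ _ (by omega), serialOne_zero]; simp
      simp [goodCnt, List.range_succ, serialOne_zero, h1, fibN]
    | k + 2 =>
      have e1 : (2:ℕ) ^ (k + 2) = 3 * 2 ^ k + 2 ^ k := by ring
      have e2 : (3:ℕ) * 2 ^ k = 2 * 2 ^ k + 2 ^ k := by ring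
      rw [e1, goodCnt_split, e2, goodCnt_split]
      have h3 : (List.range (2 ^ k)).countP (fun y => !serialOne (2 * 2 ^ k + 2 ^ k + y) 0) = 0 := by
        rw [List.countP_eq_zero]
        intro y hy
        rw [List.mem_range] at hy
        have e : 2 * 2 ^ k + 2 ^ k + y = 3 * 2 ^ k + y := by ring
        rw [e]
        simp [serialOne_bad k y 0 3 hy (by norm_num)]
      have h2 : (List.range (2 ^ k)).countP (fun y => !serialOne (2 * 2 ^ k + y) 0)
          = goodCnt (2 ^ k) := by
        unfold goodCnt
        apply List.countP_congr
        intro y hy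
        rw [List.mem_range] at hy
        rw [serialOne_prefix k y 0 2 hy (by norm_num)]
        have h1 : serialOne 1 0 = false := by
          rw [serialOne_step _ _ one_ne_zero]; simp [serialOne_zero]
        have h2 : serialOne 2 0 = false := by
          rw [serialOne_step _ _ (by omega)]
          simpa using h1
        simp [h2]
      have hpk : goodCnt (2 * 2 ^ k) = goodCnt (2 ^ (k+1)) := by
        congr 1; ring
      rw [h3, h2, hpk, ih (k+1) (by omega), ih k (by omega)]
      simp [fibN]

lemma fibList_getD : ∀ c < 35, fibList.getD c 0 = (fibN c : Int) := by decide

lemma bitLen_lt (m : Nat) : m < 2 ^ bitLen m := by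
  unfold bitLen
  by_cases h : m = 0
  · simp [h]
  · simp only [h, if_false]
    exact Nat.lt_log2_self

lemma bitLen_le_32 (m : Nat) (hm : m ≤ 2 ^ 31) : bitLen m ≤ 32 := by
  unfold bitLen
  by_cases h : m = 0
  · simp [h]
  · simp only [h, if_false]
    have : Nat.log2 m ≤ 31 := by
      have := (Nat.log2_lt h (k := 32)).mpr (by omega)
      omega
    omega

-- the loop invariant for altLoop
lemma altLoop_inv (c : Nat) :
    ∀ m : Nat, c ≤ 32 → serialOne (m / 2 ^ c) 0 = false →
      altLoop m fibList c ((m / 2 ^ c % 2 : Nat) : Int) ((goodCnt (m / 2 ^ c * 2 ^ c) : Nat) : Int)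
        = (goodCnt (m + 1) : Int) := by
  induction c with
  | zero =>
      intro m _ hg
      simp only [pow_zero, Nat.div_one] at hg
      simp only [pow_zero, Nat.div_one, mul_one, altLoop]
      rw [goodCnt_succ m, hg]
      push_cast; ring
  | succ c ih =>
      intro m hc hg
      set p := m / 2 ^ (c + 1) with hp
      have hq : m / 2 ^ c = 2 * p + m / 2 ^ c % 2 := by
        have h1 : m / 2 ^ c / 2 = p := by
          rw [hp, Nat.div_div_eq_div_mul, pow_succ]
        omega
      have hbit : (m >>> c) &&& 1 = m / 2 ^ c % 2 := by
        rw [Nat.shiftRight_eq_div_pow, Nat.and_one_is_mod]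
      rw [altLoop]
      rcases Nat.mod_two_eq_zero_or_one (m / 2 ^ c) with hb | hb
      · -- bit c of m is clear
        have hbt : ¬ ((m >>> c) &&& 1 = 1) := by rw [hbit]; omega
        rw [if_neg hbt]
        have hq0 : m / 2 ^ c = 2 * p := by omega
        have hg' : serialOne (m / 2 ^ c) 0 = false := by
          rw [hq0, serialOne_double]; exact hg
        have hI := ih m (by omega) hg'
        rw [hq0] at hI
        have h20 : 2 * p % 2 = 0 := by omega
        rw [h20] at hI
        push_cast at hI
        have e : p * 2 ^ (c + 1) = 2 * p * 2 ^ c := by ring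
        rw [e]
        exact hI
      · -- bit c of m is set
        have hbt : (m >>> c) &&& 1 = 1 := by rw [hbit, hb]
        rw [if_pos hbt]
        have hq1 : m / 2 ^ c = 2 * p + 1 := by omega
        have hfc : fibList.getD c 0 = (fibN c : Int) := fibList_getD c (by omega)
        have hans : ((goodCnt (p * 2 ^ (c + 1)) : Nat) : Int) + fibList.getD c 0
            = ((goodCnt ((2 * p + 1) * 2 ^ c) : Nat) : Int) := by
          rw [hfc]
          have e : (2 * p + 1) * 2 ^ c = 2 * p * 2 ^ c + 2 ^ c := by ring
          rw [e, goodCnt_split]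
          have hcong : (List.range (2 ^ c)).countP (fun y => !serialOne (2 * p * 2 ^ c + y) 0)
              = goodCnt (2 ^ c) := by
            unfold goodCnt
            apply List.countP_congr
            intro y hy
            rw [List.mem_range] at hy
            rw [serialOne_prefix c y 0 (2 * p) hy (by omega)]
            rw [serialOne_double, hg]
            simp
          rw [hcong, goodCnt_pow]
          have e2 : 2 * p * 2 ^ c = p * 2 ^ (c + 1) := by ring
          rw [e2]
          push_cast; ring
        simp only [ne_eq]
        rcases Nat.mod_two_eq_zero_or_one p with hp2 | hp2
        · -- prev = 0: prefix 2p+1 is still good, continue the loop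
          rw [hp2, Nat.cast_zero, if_neg (by norm_num)]
          have hg' : serialOne (m / 2 ^ c) 0 = false := by
            rw [hq1]; exact serialOne_odd p hp2 hg
          have hI := ih m (by omega) hg'
          rw [hq1] at hI
          have h21 : (2 * p + 1) % 2 = 1 := by omega
          rw [h21] at hI
          push_cast at hI
          rw [hans]
          exact hI
        · -- prev = 1: early return; everything from (2p+1)·2^c up to m is bad
          rw [hp2, Nat.cast_one, if_pos (by norm_num)]
          rw [hans]
          have hq4 : (2 * p + 1) % 4 = 3 := by omega
          have hrb : m % 2 ^ c < 2 ^ c := Nat.mod_lt _ (by positivity)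
          have hr : m = (2 * p + 1) * 2 ^ c + m % 2 ^ c := by
            conv_lhs => rw [← Nat.div_add_mod m (2 ^ c)]
            rw [hq1]
            ring
          have hm1 : goodCnt (m + 1) = goodCnt ((2 * p + 1) * 2 ^ c) := by
            conv_lhs => rw [hr]
            rw [Nat.add_assoc, goodCnt_split]
            have h0 : (List.range (m % 2 ^ c + 1)).countP
                (fun y => !serialOne ((2 * p + 1) * 2 ^ c + y) 0) = 0 := by
              rw [List.countP_eq_zero]
              intro y hy
              rw [List.mem_range] at hy
              simp [serialOne_bad c y 0 (2 * p + 1) (by omega) hq4]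
            rw [h0]
            omega
          rw [hm1]

-- A's foldl counts the good numbers
lemma foldl_count (l : List Int) :
    ∀ z : Int, l.foldl (fun count i => if !(serialOne i.toNat 0) then count + 1 else count) z
      = z + (l.countP (fun i => !serialOne i.toNat 0) : Nat) := by
  induction l with
  | nil => intro z; simp
  | cons x xs ih =>
      intro z
      rw [List.foldl_cons, List.countP_cons, ih]
      by_cases h : serialOne x.toNat 0 = false
      · simp [h]
        push_cast
        ring
      · simp [h]

lemma findIntegers1_eq (n : Int) :
    findIntegers1 n = if n < 0 then 0 else (goodCnt (n.toNat + 1) : Int) := by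
  unfold findIntegers1
  rw [PySem.List.pyRange_one, foldl_count, List.countP_map]
  by_cases h : n < 0
  · have h0 : (n + 1 - 0).toNat = 0 := by omega
    rw [h0, if_pos h]
    simp
  · have h1 : (n + 1 - 0).toNat = n.toNat + 1 := by omega
    rw [h1]
    simp only [h, if_false]
    unfold goodCnt
    rw [zero_add]
    congr 1
    apply List.countP_congr
    intro y _
    simp

-- ===== VERDICT (by name: the statement is the Claim_ definition above) =====
theorem findIntegers1_spec : Claim_equal_findIntegers1 := by
  intro n hdom
  unfold Spec_findIntegers1 findIntegers1_alt
  rw [findIntegers1_eq]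
  by_cases h : n < 0
  · simp [h]
  · simp only [h, if_false]
    have hm : n.toNat ≤ 2 ^ 31 := by
      have : n ≤ 2147483648 := by
        unfold Dom_findIntegers1 pvDomInt at hdom
        simp only [decide_eq_true_eq] at hdom
        exact hdom.2
      omega
    set m := n.toNat with hmdef
    have hbl := bitLen_le_32 m hm
    have hlt := bitLen_lt m
    have h0 : m / 2 ^ bitLen m = 0 := Nat.div_eq_of_lt hlt
    have := altLoop_inv (bitLen m) m hbl (by rw [h0]; exact serialOne_zero 0)
    rw [h0] at this
    simpa using this.symm
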